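-- pv_equiv track=rewrite | github.com/Sumit-kj/PracticeProblems | src/Array/even_position_greater_than_odd.py | even_position_greater_than_odd
-- ===== SOURCE A (Python) =====
-- def even_position_greater_than_odd(arr):
--     """
--     This function rearranges the array such that elements at even places are larger than at previous odd place
--     Approach: Sort the array, pick alternate from last and first of the list and make a new list
--     Args:
--         arr: The list of elements
--     Returns:
--         The rearranged list
--     """
--     arr.sort()
--     arr_final = []
--     i, j = 0, len(arr) - 1
--     while i < j:
--         arr_final.append(arr[j])
--         arr_final.append(arr[i])
--         i += 1
--         j -= 1
--     if i == j:
--         arr_final.append(arr[i])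
--     return arr_final
-- ===== SOURCE B (Python) =====
-- def even_position_greater_than_odd(arr):
--     arr.sort()
--     mid = len(arr) // 2
--     lower = arr[:mid]
--     upper = arr[mid:][::-1]
--     result = []
--     for h, l in zip(upper, lower):
--         result.append(h)
--         result.append(l)
--     if len(lower) < len(upper):
--         result.append(upper[-1])
--     return result
-- ===== Notes on version B (the rewrite author's own statement) =====
-- stated objective: alternative
-- what changed: Replaces the inward two-pointer while-loop over the sorted array with a split into a lower half and a reversed upper half that are interleaved by a single zip, appending the middle element for odd lengths.
import Mathlib
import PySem

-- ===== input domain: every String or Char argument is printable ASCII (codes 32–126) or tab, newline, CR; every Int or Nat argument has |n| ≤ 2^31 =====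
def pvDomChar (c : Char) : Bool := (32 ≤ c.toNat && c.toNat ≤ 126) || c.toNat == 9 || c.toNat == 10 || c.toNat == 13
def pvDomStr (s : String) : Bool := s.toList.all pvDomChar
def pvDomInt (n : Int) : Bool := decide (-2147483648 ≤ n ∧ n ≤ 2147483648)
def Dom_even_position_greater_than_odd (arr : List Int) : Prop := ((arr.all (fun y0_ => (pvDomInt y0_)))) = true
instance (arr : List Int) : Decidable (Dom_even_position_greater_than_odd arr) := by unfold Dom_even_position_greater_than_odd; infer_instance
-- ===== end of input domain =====

-- B replaces A's inward two-pointer while-loop with a split of the sorted list into the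
-- lower half and the reversed upper half, interleaved by one zip (alternative decomposition,
-- same cost). Python A sorts its argument in place; the equivalence proved here is about the
-- RETURN value only (B performs the same in-place sort).

-- ===== PORT A =====
-- the while-loop: indices i, j move inward; arr[i]/arr[j] are always in range when reached,
-- so pyGetD with default 0 is exact here
def aLoop (s : List Int) (i j : Int) (acc : List Int) : List Int :=
  if i < j then
    aLoop s (i + 1) (j - 1) (acc ++ [PySem.List.pyGetD s j 0, PySem.List.pyGetD s i 0])
  else if i = j then acc ++ [PySem.List.pyGetD s i 0]
  else acc
termination_by (j - i).toNat
decreasing_by omega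

def even_position_greater_than_odd (arr : List Int) : List Int :=
  let s := PySem.List.sorted arr (fun x => x) false
  aLoop s 0 ((s.length : Int) - 1) []

-- ===== PORT B =====
def even_position_greater_than_odd_alt (arr : List Int) : List Int :=
  let s := PySem.List.sorted arr (fun x => x) false
  let mid := s.length / 2
  let lower := s.take mid
  let upper := (s.drop mid).reverse
  let res := (upper.zip lower).foldl (fun acc p => acc ++ [p.1, p.2]) []
  -- upper[-1]: guarded by the length test, so upper is nonempty and pyGetD is exact
  if lower.length < upper.length then res ++ [PySem.List.pyGetD upper (-1) 0] else res

-- ===== PRECONDITION & SPEC =====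
def Spec_even_position_greater_than_odd (arr : List Int) (out : List Int) : Prop := out = even_position_greater_than_odd_alt arr
instance (arr : List Int) (out : List Int) : Decidable (Spec_even_position_greater_than_odd arr out) := by unfold Spec_even_position_greater_than_odd; infer_instance

-- ===== CLAIM (what is proved, stated in full; the proofs are below) =====
def Claim_equal_even_position_greater_than_odd : Prop := ∀ (arr : List Int), Dom_even_position_greater_than_odd arr → Spec_even_position_greater_than_odd arr (even_position_greater_than_odd arr)

-- ===== LEMMAS AND PROOFS =====

-- B's body as a function of the sorted list (proof helper)
def bCore (s : List Int) : List Int :=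
  if (s.take (s.length / 2)).length < ((s.drop (s.length / 2)).reverse).length then
    (((s.drop (s.length / 2)).reverse).zip (s.take (s.length / 2))).foldl
        (fun acc p => acc ++ [p.1, p.2]) []
      ++ [PySem.List.pyGetD ((s.drop (s.length / 2)).reverse) (-1) 0]
  else
    (((s.drop (s.length / 2)).reverse).zip (s.take (s.length / 2))).foldl
        (fun acc p => acc ++ [p.1, p.2]) []

lemma alt_eq_bCore (arr : List Int) :
    even_position_greater_than_odd_alt arr = bCore (PySem.List.sorted arr (fun x => x) false) := rfl

-- equation lemmas for the loop
lemma aLoop_lt (s : List Int) (i j : Int) (acc : List Int) (h : i < j) :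
    aLoop s i j acc
      = aLoop s (i + 1) (j - 1) (acc ++ [PySem.List.pyGetD s j 0, PySem.List.pyGetD s i 0]) := by
  conv_lhs => rw [aLoop]
  rw [if_pos h]

lemma aLoop_diag (s : List Int) (i : Int) (acc : List Int) :
    aLoop s i i acc = acc ++ [PySem.List.pyGetD s i 0] := by
  conv_lhs => rw [aLoop]
  simp

lemma aLoop_gt (s : List Int) (i j : Int) (acc : List Int) (h : j < i) :
    aLoop s i j acc = acc := by
  conv_lhs => rw [aLoop]
  rw [if_neg (by omega), if_neg (by omega)]

-- the loop's accumulator factors out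
lemma aLoop_append (s : List Int) (i j : Int) (acc : List Int) :
    aLoop s i j acc = acc ++ aLoop s i j [] := by
  by_cases h : i < j
  · rw [aLoop_lt s i j acc h, aLoop_lt s i j [] h,
      aLoop_append s (i + 1) (j - 1) (acc ++ _),
      aLoop_append s (i + 1) (j - 1) ([] ++ _)]
    simp
  · by_cases h2 : i = j
    · subst h2
      rw [aLoop_diag, aLoop_diag]
      simp
    · rw [aLoop_gt s i j acc (by omega), aLoop_gt s i j [] (by omega)]
      simp
termination_by (j - i).toNat
decreasing_by all_goals omega

lemma pyGetD_cons_append_shift (l : List Int) (a b : Int) (k : Int)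
    (h0 : 0 ≤ k) (h1 : k < (l.length : Int)) :
    PySem.List.pyGetD (a :: (l ++ [b])) (k + 1) 0 = PySem.List.pyGetD l k 0 := by
  rw [PySem.List.pyGetD_eq_getElem _ _ (by omega)
        (by simp only [List.length_cons, List.length_append, List.length_nil]; omega),
      PySem.List.pyGetD_eq_getElem _ _ h0 h1]
  have hk : (k + 1).toNat = k.toNat + 1 := by omega
  have hk2 : k.toNat < l.length := by omega
  simp [hk, hk2]

-- the loop on a :: (l ++ [b]) restricted to the inner indices is the loop on l
lemma aLoop_shift (l : List Int) (a b : Int) (i j : Int) (acc : List Int)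
    (hi : 0 ≤ i) (hj : j < (l.length : Int)) :
    aLoop (a :: (l ++ [b])) (i + 1) (j + 1) acc = aLoop l i j acc := by
  by_cases h : i < j
  · rw [aLoop_lt _ _ _ _ (show i + 1 < j + 1 by omega), aLoop_lt _ _ _ _ h]
    rw [pyGetD_cons_append_shift l a b j (by omega) hj,
        pyGetD_cons_append_shift l a b i hi (by omega)]
    have e2 : j + 1 - 1 = (j - 1) + 1 := by ring
    rw [e2]
    exact aLoop_shift l a b (i + 1) (j - 1) _ (by omega) (by omega)
  · by_cases h2 : i = j
    · subst h2
      rw [aLoop_diag, aLoop_diag, pyGetD_cons_append_shift l a b i hi (by omega)]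
    · rw [aLoop_gt _ _ _ _ (by omega), aLoop_gt _ _ _ _ (by omega)]
termination_by (j - i).toNat
decreasing_by all_goals omega

lemma foldl_pair_append (r : List (Int × Int)) (acc : List Int) :
    r.foldl (fun acc p => acc ++ [p.1, p.2]) acc
      = acc ++ r.foldl (fun acc p => acc ++ [p.1, p.2]) [] := by
  induction r generalizing acc with
  | nil => simp
  | cons p t ih =>
    simp only [List.foldl_cons]
    rw [ih (acc ++ [p.1, p.2]), ih ([] ++ [p.1, p.2])]
    simp

lemma bCore_nil : bCore [] = [] := by simp [bCore]

lemma bCore_single (x : Int) : bCore [x] = [x] := by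
  simp [bCore, PySem.List.pyGetD_neg_one]

lemma bCore_step (a b : Int) (l : List Int) :
    bCore (a :: (l ++ [b])) = b :: a :: bCore l := by
  unfold bCore
  have hmid : (a :: (l ++ [b])).length / 2 = l.length / 2 + 1 := by
    simp only [List.length_cons, List.length_append, List.length_nil]
    omega
  have hle : l.length / 2 ≤ l.length := by omega
  have htake : (a :: (l ++ [b])).take ((a :: (l ++ [b])).length / 2)
      = a :: l.take (l.length / 2) := by
    rw [hmid]
    simp [List.take_append_of_le_length hle]
  have hdrop : ((a :: (l ++ [b])).drop ((a :: (l ++ [b])).length / 2)).reverse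
      = b :: (l.drop (l.length / 2)).reverse := by
    rw [hmid]
    simp [List.drop_append_of_le_length hle]
  rw [htake, hdrop]
  simp only [List.zip_cons_cons, List.foldl_cons, List.nil_append]
  rw [foldl_pair_append _ [b, a]]
  by_cases hodd : (l.take (l.length / 2)).length < ((l.drop (l.length / 2)).reverse).length
  · have hodd' : (a :: l.take (l.length / 2)).length
        < (b :: (l.drop (l.length / 2)).reverse).length := by
      simp_all
    rw [if_pos hodd', if_pos hodd]
    have hne : (l.drop (l.length / 2)).reverse ≠ [] := by
      intro h; rw [h] at hodd; simp at hodd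
    rw [PySem.List.pyGetD_neg_one _ _ (by simp),
        PySem.List.pyGetD_neg_one _ _ hne,
        List.getLast_cons hne]
    simp
  · have hodd' : ¬ (a :: l.take (l.length / 2)).length
        < (b :: (l.drop (l.length / 2)).reverse).length := by
      simp_all
    rw [if_neg hodd', if_neg hodd]
    simp

lemma core (s : List Int) : aLoop s 0 ((s.length : Int) - 1) [] = bCore s := by
  induction s using List.bidirectionalRec with
  | nil =>
    rw [aLoop_gt _ _ _ _ (by norm_num), bCore_nil]
  | singleton x =>
    have h0 : ((([x] : List Int).length : Int) - 1) = 0 := by simp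
    rw [h0, aLoop_diag, bCore_single, PySem.List.pyGetD_zero_cons]
    simp
  | cons_append a l b ih =>
    have hlen : (((a :: (l ++ [b])).length : Int)) - 1 = (l.length : Int) + 1 := by
      simp only [List.length_cons, List.length_append, List.length_nil]
      push_cast
      ring
    rw [hlen, aLoop_lt _ _ _ _ (by omega)]
    have hb : PySem.List.pyGetD (a :: (l ++ [b])) ((l.length : Int) + 1) 0 = b := by
      rw [PySem.List.pyGetD_eq_getElem _ _ (by omega)
            (by simp only [List.length_cons, List.length_append, List.length_nil]; omega)]
      have h1 : ((l.length : Int) + 1).toNat = l.length + 1 := by omega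
      simp [h1]
    have ha : PySem.List.pyGetD (a :: (l ++ [b])) 0 0 = a :=
      PySem.List.pyGetD_zero_cons _ _ _
    rw [hb, ha]
    have hstep : ((l.length : Int) + 1) - 1 = ((l.length : Int) - 1) + 1 := by ring
    rw [hstep]
    rw [aLoop_shift l a b 0 ((l.length : Int) - 1) _ (by omega) (by omega),
        aLoop_append, ih, bCore_step]
    simp

-- ===== VERDICT (by name: the statement is the Claim_ definition above) =====
theorem even_position_greater_than_odd_spec : Claim_equal_even_position_greater_than_odd := by
  intro arr _
  show even_position_greater_than_odd arr = even_position_greater_than_odd_alt arr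
  rw [alt_eq_bCore, even_position_greater_than_odd]
  exact core _
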